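-- pv_equiv track=rewrite | github.com/mjson1954/WIC | Problem/3074.py | solution
-- ===== SOURCE A (Python) =====
-- def solution(M, times):
--     answer = -1
--     minTime = 1
--     maxTime = M * max(times)
--     while(minTime <= maxTime):
--         human = 0
--         avgTime = (minTime + maxTime) // 2
--         for time in times:
--             human += avgTime // time
--         if(human >= M):
--             if(answer == -1):
--                 answer = avgTime
--             else:
--                 answer = min(answer, avgTime)
--             maxTime = avgTime - 1
--         elif(human < M):
--             minTime = avgTime + 1
--
--     return answer
-- ===== SOURCE B (Python) =====
-- def solution(M, times):
--     # Simulate the machines as a stream of completion events on a leftist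
--     # min-heap.  A fixed-point rate estimate (rate/K ~ people served per unit
--     # time) first jumps to a time t0 provably below the answer; completions up
--     # to t0 are counted arithmetically, each machine is scheduled at its first
--     # completion after t0, and the remaining few people are served by popping
--     # the earliest completion one by one (re-scheduling the popped machine at
--     # value + step).  The value of the last pop is the answer.
--     if M <= 0:
--         return -1
--     K = 1 << 63
--     rate = sum(K // x for x in times)
--     t0 = max(0, M * K // (rate + len(times)) - 1)
--
--     def merge(a, b):
--         # leftist heap node: (rank, value, step, left, right); None = empty
--         if a is None:
--             return b
--         if b is None:
--             return a
--         if b[1] < a[1]: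
--             a, b = b, a
--         l = a[3]
--         r = merge(a[4], b)
--         if (l[0] if l else 0) < (r[0] if r else 0):
--             l, r = r, l
--         return ((r[0] if r else 0) + 1, a[1], a[2], l, r)
--
--     heap = None
--     served = 0
--     for x in times:
--         c = t0 // x
--         served += c
--         heap = merge(heap, (1, (c + 1) * x, x, None, None))
--     M -= served
--     while True:
--         _, val, step, left, right = heap
--         M -= 1
--         if M == 0:
--             return val
--         heap = merge(left, merge(right, (1, val + step, step, None, None)))
-- ===== Notes on version B (the rewrite author's own statement) =====
-- stated objective: alternative
-- what changed: Replaces the binary search over the answer time by an event simulation: an exact integer rate estimate (sum of K//x at a fixed scale K) jumps to a time t0 provably below the answer and counts the completions up to it arithmetically, then a hand-rolled leftist min-heap of each machine's next completion pops the earliest completion for the remaining people, re-scheduling the popped machine at value+step; the last popped value is the answer. …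
-- outside the precondition, e.g. on solution(3, [2, -1]): A returns -1, B returns -3; on solution(2, [-3]): A returns -1, B returns -6; on solution(-2, [-3]): A returns 1, B returns -1
import Mathlib
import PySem

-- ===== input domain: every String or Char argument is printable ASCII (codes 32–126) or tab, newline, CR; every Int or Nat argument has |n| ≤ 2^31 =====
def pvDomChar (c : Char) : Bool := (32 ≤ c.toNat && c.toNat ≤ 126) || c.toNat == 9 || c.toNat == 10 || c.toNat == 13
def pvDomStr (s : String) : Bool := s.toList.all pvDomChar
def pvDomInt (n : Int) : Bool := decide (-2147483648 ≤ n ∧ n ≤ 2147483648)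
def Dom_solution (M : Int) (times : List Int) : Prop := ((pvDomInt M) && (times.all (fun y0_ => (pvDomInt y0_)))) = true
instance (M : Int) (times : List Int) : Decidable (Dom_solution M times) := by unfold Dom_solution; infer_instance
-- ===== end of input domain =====

-- B replaces A's binary search over the answer by an event simulation: an exact
-- integer rate estimate jumps below the answer, then a leftist min-heap of each
-- machine's next completion pops the remaining events (objective: alternative).

-- ===== PORT A =====
-- the inner `for time in times: human += avgTime // time` loop of A
-- (B's per-step bookkeeping is proved against the same count below).
def pvServed (times : List Int) (t : Int) : Int :=
  times.foldl (fun h x => h + PySem.Int.floordiv t x) 0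

-- A's `while minTime <= maxTime` binary-search loop, state (answer, minTime, maxTime)
def pvALoop (M : Int) (times : List Int) (answer lo hi : Int) : Int :=
  if h : lo ≤ hi then
    if M ≤ pvServed times (PySem.Int.floordiv (lo + hi) 2) then
      pvALoop M times
        (if answer = -1 then PySem.Int.floordiv (lo + hi) 2
         else min answer (PySem.Int.floordiv (lo + hi) 2))
        lo (PySem.Int.floordiv (lo + hi) 2 - 1)
    else
      pvALoop M times answer (PySem.Int.floordiv (lo + hi) 2 + 1) hi
  else answer
termination_by (hi - lo + 1).toNat
decreasing_by
  · rw [sub_right_comm, sub_add_cancel]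
    exact (Int.toNat_lt_toNat (Int.lt_add_one_iff.mpr (sub_nonneg.mpr h))).mpr
      (Int.lt_add_one_iff.mpr
        (sub_le_sub_right (PySem.Int.floordiv_two_mid_bounds h).2 lo))
  · rw [sub_add_eq_sub_sub, sub_add_cancel]
    exact (Int.toNat_lt_toNat (Int.lt_add_one_iff.mpr (sub_nonneg.mpr h))).mpr
      (Int.lt_add_one_iff.mpr
        (sub_le_sub_left (PySem.Int.floordiv_two_mid_bounds h).1 hi))

def solution (M : Int) (times : List Int) : Int :=
  pvALoop M times (-1) 1 (M * ((PySem.List.max? times (fun x => x)).getD 0))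

-- ===== PORT B =====
-- leftist min-heap node (rank, value, step, left, right); `.nil` = Python's None
inductive PvHeap : Type
  | nil : PvHeap
  | node : Int → Int → Int → PvHeap → PvHeap → PvHeap
deriving DecidableEq, Repr

-- `(h[0] if h else 0)`
def pvRank : PvHeap → Int
  | .nil => 0
  | .node k _ _ _ _ => k

def pvSize : PvHeap → Nat
  | .nil => 0
  | .node _ _ _ l r => pvSize l + pvSize r + 1

-- size bound pvMerge cites by name in `decreasing_by`
theorem pvSize_lt_right (k v s : Int) (l r : PvHeap) :
    pvSize r < pvSize (.node k v s l r) :=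
  Nat.lt_succ_of_le (Nat.le_add_left _ _)

-- Source B's swap-and-rebuild tail of `merge`: keep the shorter right spine right,
-- recompute the rank from the final right child
def pvNodeOf (v s : Int) (l r : PvHeap) : PvHeap :=
  if pvRank l < pvRank r then .node (pvRank l + 1) v s r l
  else .node (pvRank r + 1) v s l r

-- Source B's `merge`: the smaller root wins and its right child is merged with the other heap
def pvMerge : PvHeap → PvHeap → PvHeap
  | .nil, b => b
  | .node ka va sa la ra, .nil => .node ka va sa la ra
  | .node ka va sa la ra, .node kb vb sb lb rb =>
    if vb < va then pvNodeOf vb sb lb (pvMerge rb (.node ka va sa la ra))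
    else pvNodeOf va sa la (pvMerge ra (.node kb vb sb lb rb))
termination_by a b => pvSize a + pvSize b
decreasing_by
  · rw [Nat.add_comm (pvSize rb)]
    exact Nat.add_lt_add_left (pvSize_lt_right kb vb sb lb rb) _
  · exact Nat.add_lt_add_right (pvSize_lt_right ka va sa la ra) _

-- Source B's `while True` pop loop; the countdown `M -= 1; if M == 0: return val` is
-- ported as the Nat fuel m = M - 1 (number of re-scheduling iterations before the
-- returned pop); `.nil` is unreachable for a nonempty machine list (Python raises).
def pvPopLoop : Nat → PvHeap → Int
  | _, .nil => 0
  | 0, .node _ v _ _ _ => v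
  | m + 1, .node _ v s l r =>
      pvPopLoop m (pvMerge l (pvMerge r (.node 1 (v + s) s .nil .nil)))

-- `K = 1 << 63`
def pvK : Int := 9223372036854775808

-- `rate = sum(K // x for x in times)`
def pvRate (times : List Int) : Int :=
  times.foldl (fun a x => a + PySem.Int.floordiv pvK x) 0

-- `t0 = max(0, M * K // (rate + len(times)) - 1)`
def pvT0 (M : Int) (times : List Int) : Int :=
  max 0 (PySem.Int.floordiv (M * pvK) (pvRate times + (times.length : Int)) - 1)

-- the `for x in times` loop, carrying (heap, served): each machine is scheduled
-- at its first completion after t0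
def pvBuild (t0 : Int) (times : List Int) : PvHeap × Int :=
  times.foldl
    (fun (p : PvHeap × Int) x =>
      (pvMerge p.1 (.node 1 ((PySem.Int.floordiv t0 x + 1) * x) x .nil .nil),
       p.2 + PySem.Int.floordiv t0 x))
    (.nil, 0)

def solution_alt (M : Int) (times : List Int) : Int :=
  if M ≤ 0 then -1
  else
    -- `M -= served`, then the `while True` pop loop (fuel = remaining pops - 1)
    pvPopLoop (M - (pvBuild (pvT0 M times) times).2 - 1).toNat
      (pvBuild (pvT0 M times) times).1

-- ===== PRECONDITION & SPEC =====
-- Pre_ keeps the natural domain — a nonempty list of positive machine times — plus the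
-- degenerate requests M ≤ 0 whose answer -1 never touches the list (search range empty).
-- Excluded: inputs where A raises ([] → ValueError; a 0 time reached by the loop →
-- ZeroDivisionError), and inputs with a non-positive time where A's binary search probes a
-- non-monotone count and its value (-1 or a probe midpoint) is an artifact of the search path.
def Pre_solution (M : Int) (times : List Int) : Prop :=
  times ≠ [] ∧
    ((1 ≤ M ∧ ∀ x ∈ times, 1 ≤ x) ∨ M = 0 ∨ (M < 0 ∧ ∃ x ∈ times, 0 ≤ x))
instance (M : Int) (times : List Int) : Decidable (Pre_solution M times) := by
  unfold Pre_solution; infer_instance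

def pvWitness_solution : Int × List Int := (3, [1, 2])

def Spec_solution (M : Int) (times : List Int) (out : Int) : Prop := out = solution_alt M times
instance (M : Int) (times : List Int) (out : Int) : Decidable (Spec_solution M times out) := by
  unfold Spec_solution; infer_instance

-- ===== CLAIM (what is proved, stated in full; the proofs are below) =====
def Claim_equal_solution : Prop := ∀ (M : Int) (times : List Int), Dom_solution M times → Pre_solution M times → Spec_solution M times (solution M times)

-- ===== LEMMAS AND PROOFS =====

theorem pvServed_eq_sum (times : List Int) (t : Int) :
    pvServed times t = (times.map (fun x => PySem.Int.floordiv t x)).sum := by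
  simpa using PySem.List.foldl_add times (fun x => PySem.Int.floordiv t x) 0

theorem pvServed_mono (times : List Int) (hpos : ∀ x ∈ times, 1 ≤ x) {t u : Int}
    (h : t ≤ u) : pvServed times t ≤ pvServed times u := by
  rw [pvServed_eq_sum, pvServed_eq_sum]
  refine List.sum_le_sum (fun x hx => ?_)
  have hx1 := hpos x hx
  rw [PySem.Int.floordiv_eq_ediv_of_pos (by omega), PySem.Int.floordiv_eq_ediv_of_pos (by omega)]
  exact Int.ediv_le_ediv (by omega) h

theorem pvServed_nonpos (times : List Int) (hpos : ∀ x ∈ times, 1 ≤ x) {t : Int}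
    (h : t ≤ 0) : pvServed times t ≤ 0 := by
  rw [pvServed_eq_sum]
  have : ∀ x ∈ times, PySem.Int.floordiv t x ≤ (fun _ : Int => (0:Int)) x := by
    intro x hx
    have hx1 := hpos x hx
    rw [PySem.Int.floordiv_eq_ediv_of_pos (by omega)]
    calc t / x ≤ 0 / x := Int.ediv_le_ediv (by omega) h
    _ = 0 := Int.zero_ediv x
  calc (times.map (fun x => PySem.Int.floordiv t x)).sum
      ≤ (times.map (fun _ => (0:Int))).sum := List.sum_le_sum this
    _ = 0 := by rw [PySem.List.sum_map_const_int]; ring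

theorem pvServed_lower (times : List Int) (hpos : ∀ x ∈ times, 1 ≤ x) {m t : Int}
    (hmem : m ∈ times) (ht : 0 ≤ t) : PySem.Int.floordiv t m ≤ pvServed times t := by
  obtain ⟨s, u, rfl⟩ := List.append_of_mem hmem
  rw [pvServed_eq_sum, List.map_append, List.sum_append, List.map_cons, List.sum_cons]
  have hterm : ∀ x ∈ s ++ m :: u, 0 ≤ PySem.Int.floordiv t x := by
    intro x hx
    have hx1 := hpos x hx
    rw [PySem.Int.floordiv_eq_ediv_of_pos (by omega)]
    exact Int.ediv_nonneg ht (by omega)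
  have h1 : 0 ≤ (s.map (fun x => PySem.Int.floordiv t x)).sum :=
    List.sum_nonneg (by
      intro y hy
      obtain ⟨x, hx, rfl⟩ := List.mem_map.mp hy
      exact hterm x (List.mem_append_left _ hx))
  have h2 : 0 ≤ (u.map (fun x => PySem.Int.floordiv t x)).sum :=
    List.sum_nonneg (by
      intro y hy
      obtain ⟨x, hx, rfl⟩ := List.mem_map.mp hy
      exact hterm x (List.mem_append_right _ (List.mem_cons_of_mem _ hx)))
  omega

-- the threshold L: least time at which at least M people are served
theorem pvLeast (M : Int) (times : List Int) (hpos : ∀ x ∈ times, 1 ≤ x)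
    (hne : times ≠ []) (hM : 1 ≤ M) :
    ∃ L : Int, 1 ≤ L ∧ L ≤ M * ((PySem.List.max? times (fun x => x)).getD 0) ∧
      M ≤ pvServed times L ∧ ∀ u : Int, u < L → pvServed times u < M := by
  obtain ⟨m, hm⟩ : ∃ m, PySem.List.max? times (fun x => x) = some m := by
    cases h : PySem.List.max? times (fun x => x) with
    | none => exact absurd ((PySem.List.max?_eq_none_iff times _).mp h) hne
    | some m => exact ⟨m, rfl⟩
  have hmem := PySem.List.max?_mem hm
  have hm1 : 1 ≤ m := hpos m hmem
  have hMm : 0 ≤ M * m := by positivity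
  have hub : M ≤ pvServed times (M * m) := by
    have := pvServed_lower times hpos hmem hMm
    rwa [PySem.Int.floordiv_eq_ediv_of_pos (by omega), Int.mul_ediv_cancel M (by omega)] at this
  have hQex : ∃ n : Nat, M ≤ pvServed times (n : Int) :=
    ⟨(M * m).toNat, by rwa [Int.toNat_of_nonneg hMm]⟩
  have hfind := Nat.find_spec hQex
  refine ⟨(Nat.find hQex : Nat), ?_, ?_, hfind, ?_⟩
  · by_contra h
    have h0 : Nat.find hQex = 0 := by omega
    rw [h0] at hfind
    norm_num at hfind
    have := pvServed_nonpos times hpos (t := (0:Int)) le_rfl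
    omega
  · have hle : Nat.find hQex ≤ (M * m).toNat :=
      Nat.find_min' hQex (by rwa [Int.toNat_of_nonneg hMm])
    rw [hm]; simp only [Option.getD_some]; omega
  · intro u hu
    by_cases hu0 : u ≤ 0
    · have := pvServed_nonpos times hpos hu0; omega
    · have hn : u = ((u.toNat : Nat) : Int) := by omega
      have : ¬ M ≤ pvServed times ((u.toNat : Nat) : Int) := Nat.find_min hQex (by omega)
      rw [hn]; omega

theorem pvP_iff (M : Int) (times : List Int) (L : Int) (hpos : ∀ x ∈ times, 1 ≤ x)
    (hLP : M ≤ pvServed times L) (hLmin : ∀ u : Int, u < L → pvServed times u < M)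
    (t : Int) : M ≤ pvServed times t ↔ L ≤ t := by
  constructor
  · intro h; by_contra hc
    have := hLmin t (by omega); omega
  · intro h; exact le_trans hLP (pvServed_mono times hpos h)

-- A's binary search returns min(answer, L) when L is in range, else answer
theorem pvALoop_eq (M : Int) (times : List Int) (L : Int) (hpos : ∀ x ∈ times, 1 ≤ x)
    (hL1 : 1 ≤ L) (hLP : M ≤ pvServed times L)
    (hLmin : ∀ u : Int, u < L → pvServed times u < M) :
    ∀ (n : Nat) (lo hi answer : Int), (hi - lo + 1).toNat ≤ n → lo ≤ L →
      (answer = -1 ∨ L ≤ answer) →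
      pvALoop M times answer lo hi =
        if L ≤ hi then (if answer = -1 then L else min answer L) else answer := by
  intro n
  induction n with
  | zero =>
    intro lo hi answer hn hlo hans
    rw [pvALoop]
    rw [dif_neg (by omega)]
    rw [if_neg (by omega)]
  | succ n ih =>
    intro lo hi answer hn hlo hans
    rw [pvALoop]
    by_cases hlh : lo ≤ hi
    · rw [dif_pos hlh]
      obtain ⟨hm1, hm2⟩ := PySem.Int.floordiv_two_mid_bounds hlh
      by_cases hp : M ≤ pvServed times (PySem.Int.floordiv (lo + hi) 2)
      · rw [if_pos hp]
        have hLmid : L ≤ PySem.Int.floordiv (lo + hi) 2 :=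
          (pvP_iff M times L hpos hLP hLmin _).mp hp
        have hans' :
            (if answer = -1 then PySem.Int.floordiv (lo + hi) 2
             else min answer (PySem.Int.floordiv (lo + hi) 2)) = -1 ∨
            L ≤ (if answer = -1 then PySem.Int.floordiv (lo + hi) 2
             else min answer (PySem.Int.floordiv (lo + hi) 2)) := by
          right; rcases hans with h | h <;> split_ifs <;> omega
        rw [ih lo (PySem.Int.floordiv (lo + hi) 2 - 1) _ (by omega) hlo hans']
        rcases hans with h | h <;> split_ifs <;> omega
      · rw [if_neg hp]
        have hmidL : PySem.Int.floordiv (lo + hi) 2 < L := by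
          by_contra hc
          exact hp ((pvP_iff M times L hpos hLP hLmin _).mpr (by omega))
        rw [ih (PySem.Int.floordiv (lo + hi) 2 + 1) hi answer (by omega) (by omega) hans]
    · rw [dif_neg hlh, if_neg (by omega)]

-- ——— B-side: heap contents as a multiset, heap order ———

def pvElems : PvHeap → Multiset (Int × Int)
  | .nil => 0
  | .node _ v s l r => (v, s) ::ₘ (pvElems l + pvElems r)

def pvLB (b : Int) (h : PvHeap) : Prop := ∀ p ∈ pvElems h, b ≤ p.1

def pvOrd : PvHeap → Prop
  | .nil => True
  | .node _ v _ l r => pvOrd l ∧ pvOrd r ∧ pvLB v l ∧ pvLB v r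

theorem pvElems_nodeOf (v s : Int) (l r : PvHeap) :
    pvElems (pvNodeOf v s l r) = (v, s) ::ₘ (pvElems l + pvElems r) := by
  unfold pvNodeOf
  split_ifs
  · simp only [pvElems]; rw [add_comm]
  · simp only [pvElems]

theorem pvElems_merge (a b : PvHeap) :
    pvElems (pvMerge a b) = pvElems a + pvElems b := by
  induction a, b using pvMerge.induct with
  | case1 b => simp [pvMerge, pvElems]
  | case2 ka va sa la ra => simp [pvMerge, pvElems]
  | case3 ka va sa la ra kb vb sb lb rb hlt ih =>
    rw [pvMerge, if_pos hlt, pvElems_nodeOf, ih]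
    simp only [pvElems, ← Multiset.singleton_add]
    abel
  | case4 ka va sa la ra kb vb sb lb rb hlt ih =>
    rw [pvMerge, if_neg hlt, pvElems_nodeOf, ih]
    simp only [pvElems, ← Multiset.singleton_add]
    abel

theorem pvLB_of_ord {k v s : Int} {l r : PvHeap} (h : pvOrd (.node k v s l r)) :
    pvLB v (.node k v s l r) := by
  obtain ⟨_, _, hl, hr⟩ := h
  intro p hp
  simp only [pvElems, Multiset.mem_cons, Multiset.mem_add] at hp
  rcases hp with rfl | hp | hp
  · exact le_refl _
  · exact hl p hp
  · exact hr p hp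

theorem pvLB_mono {b c : Int} {h : PvHeap} (hbc : b ≤ c) (hc : pvLB c h) : pvLB b h :=
  fun p hp => le_trans hbc (hc p hp)

theorem pvLB_merge {b : Int} {x y : PvHeap} (hx : pvLB b x) (hy : pvLB b y) :
    pvLB b (pvMerge x y) := by
  intro p hp
  rw [pvElems_merge] at hp
  rcases Multiset.mem_add.mp hp with h | h
  · exact hx p h
  · exact hy p h

theorem pvOrd_nodeOf (v s : Int) (l r : PvHeap) (hl : pvOrd l) (hr : pvOrd r)
    (hll : pvLB v l) (hlr : pvLB v r) : pvOrd (pvNodeOf v s l r) := by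
  unfold pvNodeOf
  split_ifs <;> exact ⟨by assumption, by assumption, by assumption, by assumption⟩

theorem pvOrd_merge (a b : PvHeap) : pvOrd a → pvOrd b → pvOrd (pvMerge a b) := by
  induction a, b using pvMerge.induct with
  | case1 b => intro _ hb; simpa [pvMerge]
  | case2 ka va sa la ra => intro ha _; simpa [pvMerge]
  | case3 ka va sa la ra kb vb sb lb rb hlt ih =>
    intro ha hb
    obtain ⟨hbl, hbr, hbll, hblr⟩ := hb
    have hma : pvLB vb (.node ka va sa la ra) :=
      pvLB_mono (by omega) (pvLB_of_ord ha)
    rw [pvMerge, if_pos hlt]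
    exact pvOrd_nodeOf _ _ _ _ hbl (ih hbr ha) hbll (pvLB_merge hblr hma)
  | case4 ka va sa la ra kb vb sb lb rb hlt ih =>
    intro ha hb
    obtain ⟨hal, har, hall, halr⟩ := ha
    have hmb : pvLB va (.node kb vb sb lb rb) :=
      pvLB_mono (by omega) (pvLB_of_ord hb)
    rw [pvMerge, if_neg hlt]
    exact pvOrd_nodeOf _ _ _ _ hal (ih har hb) hall (pvLB_merge halr hmb)

-- ——— the simulation invariant ———
-- E is the heap's multiset of (next completion, step) events; each machine's
-- step appears exactly once; every event is the next multiple of its step after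
-- the last popped value vlast; k events have been popped so far.
def pvInv (times : List Int) (E : Multiset (Int × Int)) (vlast k : Int) : Prop :=
  E.map Prod.snd = (times : Multiset Int) ∧
  (∀ p ∈ E, 1 ≤ p.2 ∧ p.2 ∣ p.1 ∧ p.2 ≤ p.1 ∧ p.1 - p.2 ≤ vlast ∧ vlast ≤ p.1) ∧
  (E.map (fun p => p.1 / p.2 - 1)).sum = k

theorem pvServed_elems (times : List Int) (hpos : ∀ x ∈ times, 1 ≤ x)
    (E : Multiset (Int × Int)) (hmap : E.map Prod.snd = (times : Multiset Int)) (t : Int) :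
    pvServed times t = (E.map (fun p => t / p.2)).sum := by
  rw [pvServed_eq_sum]
  have h1 : times.map (fun x => PySem.Int.floordiv t x) = times.map (fun x => t / x) :=
    List.map_congr_left (fun x hx =>
      PySem.Int.floordiv_eq_ediv_of_pos (by have := hpos x hx; omega))
  rw [h1]
  have : (E.map (fun p => t / p.2)) = (E.map Prod.snd).map (fun x => t / x) := by
    rw [Multiset.map_map]; rfl
  rw [this, hmap]
  simp

-- one pop: bounds on the popped minimum v, and the invariant after re-scheduling
theorem pvPopStep (times : List Int) (hpos : ∀ x ∈ times, 1 ≤ x)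
    (E' : Multiset (Int × Int)) (v s vlast k : Int)
    (hinv : pvInv times ((v, s) ::ₘ E') vlast k)
    (hmin : ∀ p ∈ (v, s) ::ₘ E', v ≤ p.1) :
    pvServed times (v - 1) ≤ k ∧ k + 1 ≤ pvServed times v ∧
      pvInv times ((v + s, s) ::ₘ E') v (k + 1) := by
  obtain ⟨hmap, hper, hsum⟩ := hinv
  have hvself := hper (v, s) (Multiset.mem_cons_self _ _)
  obtain ⟨hs1, hdvd, hsv, _, hlv⟩ := hvself
  refine ⟨?_, ?_, ?_, ?_, ?_⟩
  · -- pvServed times (v-1) ≤ k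
    rw [pvServed_elems times hpos _ hmap]
    have : ∀ p ∈ (v, s) ::ₘ E', (v - 1) / p.2 ≤ p.1 / p.2 - 1 := by
      intro p hp
      obtain ⟨hp1, hpd, hps, _, _⟩ := hper p hp
      obtain ⟨c, hc⟩ := hpd
      have hcv : v ≤ c * p.2 := by rw [mul_comm, ← hc]; exact hmin p hp
      have h1 : (v - 1) / p.2 < c := by
        rw [Int.ediv_lt_iff_lt_mul (by omega)]; omega
      have h2 : p.1 / p.2 = c := by rw [hc, Int.mul_ediv_cancel_left _ (by omega)]
      omega
    calc (((v, s) ::ₘ E').map (fun p => (v - 1) / p.2)).sum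
        ≤ (((v, s) ::ₘ E').map (fun p => p.1 / p.2 - 1)).sum :=
          Multiset.sum_map_le_sum_map _ _ this
      _ = k := hsum
  · -- k + 1 ≤ pvServed times v
    rw [pvServed_elems times hpos _ hmap]
    have hE' : (E'.map (fun p => p.1 / p.2 - 1)).sum ≤ (E'.map (fun p => v / p.2)).sum := by
      refine Multiset.sum_map_le_sum_map _ _ ?_
      intro p hp
      obtain ⟨hp1, hpd, hps, hpv, hvp⟩ := hper p (Multiset.mem_cons_of_mem hp)
      obtain ⟨c, hc⟩ := hpd
      have h2 : p.1 / p.2 = c := by rw [hc, Int.mul_ediv_cancel_left _ (by omega)]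
      have h3 : (c - 1) * p.2 = p.1 - p.2 := by rw [hc]; ring
      have h4 : (c - 1) * p.2 ≤ v := by omega
      have h5 : c - 1 ≤ v / p.2 := (Int.le_ediv_iff_mul_le (by omega)).mpr h4
      omega
    simp only [Multiset.map_cons, Multiset.sum_cons] at hsum ⊢
    have hvs : v / s = v / s := rfl
    linarith [hE', hsum.ge, hsum.le]
  · -- new map snd
    have : ((v + s, s) ::ₘ E').map Prod.snd = ((v, s) ::ₘ E').map Prod.snd := by
      simp [Multiset.map_cons]
    rw [this, hmap]
  · -- new per-element conditions
    intro p hp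
    rcases Multiset.mem_cons.mp hp with rfl | hp'
    · exact ⟨hs1, by simpa using (dvd_add hdvd dvd_rfl), by omega, by omega, by omega⟩
    · obtain ⟨hp1, hpd, hps, hpv, hvp⟩ := hper p (Multiset.mem_cons_of_mem hp')
      have := hmin p (Multiset.mem_cons_of_mem hp')
      exact ⟨hp1, hpd, hps, by omega, this⟩
  · -- new sum = k + 1
    have hnew : (v + s) / s = v / s + 1 := by
      have := Int.add_mul_ediv_right v 1 (show s ≠ 0 by omega)
      simpa using this
    simp only [Multiset.map_cons, Multiset.sum_cons] at hsum ⊢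
    rw [hnew]; omega

-- the build loop's accumulator: served count and heap contents
theorem pvBuildP_snd (t0 : Int) (times : List Int) : ∀ (acc : PvHeap × Int),
    (times.foldl
      (fun (p : PvHeap × Int) x =>
        (pvMerge p.1 (.node 1 ((PySem.Int.floordiv t0 x + 1) * x) x .nil .nil),
         p.2 + PySem.Int.floordiv t0 x)) acc).2 =
      acc.2 + (times.map (fun x => PySem.Int.floordiv t0 x)).sum := by
  induction times with
  | nil => intro acc; simp
  | cons t ts ih =>
    intro acc
    simp only [List.foldl_cons, List.map_cons, List.sum_cons]
    rw [ih]
    simp only []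
    ring

theorem pvBuildP_elems (t0 : Int) (times : List Int) : ∀ (acc : PvHeap × Int),
    pvElems (times.foldl
      (fun (p : PvHeap × Int) x =>
        (pvMerge p.1 (.node 1 ((PySem.Int.floordiv t0 x + 1) * x) x .nil .nil),
         p.2 + PySem.Int.floordiv t0 x)) acc).1 =
      pvElems acc.1 + ↑(times.map (fun x => ((PySem.Int.floordiv t0 x + 1) * x, x))) := by
  induction times with
  | nil => intro acc; simp
  | cons t ts ih =>
    intro acc
    simp only [List.foldl_cons, List.map_cons]
    rw [ih, pvElems_merge]
    simp only [pvElems, Multiset.add_zero, ← Multiset.cons_coe]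
    rw [← Multiset.singleton_add, ← Multiset.singleton_add]
    abel

theorem pvBuildP_ord (t0 : Int) (times : List Int) : ∀ (acc : PvHeap × Int), pvOrd acc.1 →
    pvOrd (times.foldl
      (fun (p : PvHeap × Int) x =>
        (pvMerge p.1 (.node 1 ((PySem.Int.floordiv t0 x + 1) * x) x .nil .nil),
         p.2 + PySem.Int.floordiv t0 x)) acc).1 := by
  induction times with
  | nil => intro acc h; simpa using h
  | cons t ts ih =>
    intro acc h
    simp only [List.foldl_cons]
    refine ih _ (pvOrd_merge _ _ h ?_)
    exact ⟨trivial, trivial, fun p hp => by simp [pvElems] at hp,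
           fun p hp => by simp [pvElems] at hp⟩

-- per-machine rate bound: (t0 // x) * K ≤ t0 * (K // x + 1)
theorem pvRateTerm (x t0 K : Int) (hx : 1 ≤ x) (ht : 0 ≤ t0) (hK : 0 ≤ K) :
    t0 / x * K ≤ t0 * (K / x + 1) := by
  have ha : 0 ≤ t0 / x := Int.ediv_nonneg ht (by omega)
  have hax : t0 / x * x ≤ t0 := Int.ediv_mul_le t0 (by omega)
  have hKx : K < (K / x + 1) * x := Int.lt_ediv_add_one_mul_self K (by omega)
  have hb : 0 ≤ K / x + 1 := by
    have := Int.ediv_nonneg hK (show (0:Int) ≤ x by omega); omega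
  calc t0 / x * K ≤ t0 / x * ((K / x + 1) * x) :=
        mul_le_mul_of_nonneg_left (le_of_lt hKx) ha
    _ = (K / x + 1) * (t0 / x * x) := by ring
    _ ≤ (K / x + 1) * t0 := mul_le_mul_of_nonneg_left hax hb
    _ = t0 * (K / x + 1) := by ring

-- summed rate bound: (sum of t0 // x) * K ≤ t0 * (rate + n)
theorem pvRateSum (t0 K : Int) (ht : 0 ≤ t0) (hK : 0 ≤ K) :
    ∀ (times : List Int), (∀ x ∈ times, 1 ≤ x) →
      (times.map (fun x => PySem.Int.floordiv t0 x)).sum * K ≤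
        t0 * ((times.map (fun x => PySem.Int.floordiv K x)).sum + (times.length : Int)) := by
  intro times
  induction times with
  | nil => intro _; simp
  | cons y ys ih =>
    intro hpos
    have hy := hpos y List.mem_cons_self
    have ihy := ih (fun x hx => hpos x (List.mem_cons_of_mem _ hx))
    simp only [List.map_cons, List.sum_cons, List.length_cons]
    rw [PySem.Int.floordiv_eq_ediv_of_pos (show (0:Int) < y by omega),
        PySem.Int.floordiv_eq_ediv_of_pos (show (0:Int) < y by omega)]
    have hterm : t0 / y * K ≤ t0 * (K / y + 1) := pvRateTerm y t0 K hy ht hK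
    push_cast
    nlinarith [ihy, hterm]

-- the pop loop: with the invariant at k = M - 1 - m remaining pops, the returned
-- value v has pvServed (v-1) ≤ M - 1 and M ≤ pvServed v
theorem pvPop_inv (M : Int) (times : List Int) (hpos : ∀ x ∈ times, 1 ≤ x)
    (hne : times ≠ []) :
    ∀ (m : Nat) (h : PvHeap) (vlast : Int), pvOrd h →
      pvInv times (pvElems h) vlast (M - 1 - m) →
      pvServed times (pvPopLoop m h - 1) ≤ M - 1 ∧ M ≤ pvServed times (pvPopLoop m h) := by
  intro m
  induction m with
  | zero =>
    intro h vlast hord hinv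
    match h with
    | .nil =>
      exfalso
      have := hinv.1
      simp only [pvElems, Multiset.map_zero] at this
      exact hne (by simpa using this.symm)
    | .node k v s l r =>
      have hmin : ∀ p ∈ (v, s) ::ₘ (pvElems l + pvElems r), v ≤ p.1 := by
        have := pvLB_of_ord hord
        simpa [pvLB, pvElems] using this
      have hinv' : pvInv times ((v, s) ::ₘ (pvElems l + pvElems r)) vlast (M - 1) := by
        have : M - 1 - ((0 : Nat) : Int) = M - 1 := by push_cast; ring
        rw [← this]
        simpa [pvElems] using hinv
      obtain ⟨h1, h2, _⟩ := pvPopStep times hpos _ v s vlast (M - 1) hinv' hmin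
      simp only [pvPopLoop]
      exact ⟨h1, by omega⟩
  | succ m ih =>
    intro h vlast hord hinv
    match h with
    | .nil =>
      exfalso
      have := hinv.1
      simp only [pvElems, Multiset.map_zero] at this
      exact hne (by simpa using this.symm)
    | .node k v s l r =>
      have hmin : ∀ p ∈ (v, s) ::ₘ (pvElems l + pvElems r), v ≤ p.1 := by
        have := pvLB_of_ord hord
        simpa [pvLB, pvElems] using this
      have hinv' : pvInv times ((v, s) ::ₘ (pvElems l + pvElems r)) vlast (M - 1 - (m + 1)) := by
        have hc : M - 1 - (((m : Nat) + 1 : Nat) : Int) = M - 1 - ((m : Int) + 1) := by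
          push_cast; ring
        rw [← hc]
        simpa [pvElems] using hinv
      obtain ⟨_, _, hnew⟩ := pvPopStep times hpos _ v s vlast (M - 1 - (m + 1)) hinv' hmin
      have hsingle : pvOrd (PvHeap.node 1 (v + s) s .nil .nil) :=
        ⟨trivial, trivial, fun p hp => by simp [pvElems] at hp,
         fun p hp => by simp [pvElems] at hp⟩
      have hord' : pvOrd (pvMerge l (pvMerge r (.node 1 (v + s) s .nil .nil))) :=
        pvOrd_merge _ _ hord.1 (pvOrd_merge _ _ hord.2.1 hsingle)
      have helems : pvElems (pvMerge l (pvMerge r (.node 1 (v + s) s .nil .nil))) =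
          (v + s, s) ::ₘ (pvElems l + pvElems r) := by
        rw [pvElems_merge, pvElems_merge]
        simp only [pvElems, Multiset.add_zero]
        rw [← Multiset.singleton_add, ← Multiset.singleton_add]
        abel
      have hinv'' : pvInv times
          (pvElems (pvMerge l (pvMerge r (.node 1 (v + s) s .nil .nil)))) v
          (M - 1 - (m : Nat)) := by
        rw [helems]
        have hk : M - 1 - (m + 1) + 1 = M - 1 - ((m : Nat) : Int) := by ring
        rw [← hk]
        exact hnew
      simpa only [pvPopLoop] using ih _ v hord' hinv''

-- ===== VERDICT (by name: the statement is the Claim_ definition above) =====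
theorem solution_spec : Claim_equal_solution := by
  intro M times _ hpre
  obtain ⟨hne, hcases⟩ := hpre
  unfold Spec_solution
  obtain ⟨m, hm⟩ : ∃ m, PySem.List.max? times (fun x => x) = some m := by
    cases h : PySem.List.max? times (fun x => x) with
    | none => exact absurd ((PySem.List.max?_eq_none_iff times _).mp h) hne
    | some m => exact ⟨m, rfl⟩
  have hmax := PySem.List.max?_isMax hm
  rcases hcases with ⟨hM1, hpos⟩ | hM0 | ⟨hMneg, x, hxmem, hx0⟩
  · -- the real domain: M ≥ 1, every machine time ≥ 1; both sides compute the threshold L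
    have hm1 : 1 ≤ m := hpos m (PySem.List.max?_mem hm)
    obtain ⟨L, hL1, hLle, hLP, hLmin⟩ := pvLeast M times hpos hne hM1
    rw [hm] at hLle; simp only [Option.getD_some] at hLle
    have hA : solution M times = L := by
      unfold solution
      rw [hm]; simp only [Option.getD_some]
      rw [pvALoop_eq M times L hpos hL1 hLP hLmin (M * m - 1 + 1).toNat 1 (M * m) (-1)
        (by omega) (by omega) (Or.inl rfl)]
      rw [if_pos hLle, if_pos rfl]
    have hB : solution_alt M times = L := by
      unfold solution_alt
      rw [if_neg (by omega)]
      set K : Int := pvK with hKdef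
      have hK0 : (0:Int) < K := by norm_num [hKdef, pvK]
      set R := pvRate times with hRdef
      have hRsum : R = (times.map (fun x => PySem.Int.floordiv K x)).sum := by
        rw [hRdef, pvRate]
        simpa using PySem.List.foldl_add times (fun x => PySem.Int.floordiv pvK x) 0
      have hR0 : 0 ≤ R := by
        rw [hRsum]
        refine List.sum_nonneg (fun a ha => ?_)
        obtain ⟨x, hx, rfl⟩ := List.mem_map.mp ha
        have := hpos x hx
        rw [PySem.Int.floordiv_eq_ediv_of_pos (by omega)]
        exact Int.ediv_nonneg (by omega) (by omega)
      have hn1 : 1 ≤ (times.length : Int) := by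
        have : times.length ≠ 0 := fun h => hne (List.length_eq_zero_iff.mp h)
        omega
      set t0 := pvT0 M times with ht0def
      have ht0eq : t0 = max 0 (PySem.Int.floordiv (M * K) (R + (times.length : Int)) - 1) := by
        rw [ht0def, pvT0, hKdef, hRdef]
      have ht0 : 0 ≤ t0 := by rw [ht0eq]; exact le_max_left _ _
      -- t0 * (R + n) < M * K, hence pvServed times t0 < M
      have hest : t0 * (R + (times.length : Int)) < M * K := by
        rcases max_choice 0 (PySem.Int.floordiv (M * K) (R + (times.length : Int)) - 1) with h0 | h0
        · rw [ht0eq, h0]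
          have : (0:Int) < M * K := by positivity
          omega
        · rw [ht0eq, h0]
          rw [PySem.Int.floordiv_eq_ediv_of_pos (by omega)]
          have hq : M * K / (R + (times.length : Int)) * (R + (times.length : Int)) ≤ M * K :=
            Int.ediv_mul_le _ (by omega)
          have hexp : (M * K / (R + (times.length : Int)) - 1) * (R + (times.length : Int)) =
              M * K / (R + (times.length : Int)) * (R + (times.length : Int)) -
                (R + (times.length : Int)) := by ring
          omega
      have hS : pvServed times t0 < M := by
        have h1 := pvRateSum t0 K ht0 (le_of_lt hK0) times hpos
        rw [← pvServed_eq_sum, ← hRsum] at h1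
        by_contra hc
        have h2 : M * K ≤ pvServed times t0 * K :=
          mul_le_mul_of_nonneg_right (by omega) (le_of_lt hK0)
        omega
      have hS0 : 0 ≤ pvServed times t0 := by
        rw [pvServed_eq_sum]
        refine List.sum_nonneg (fun a ha => ?_)
        obtain ⟨x, hx, rfl⟩ := List.mem_map.mp ha
        have := hpos x hx
        rw [PySem.Int.floordiv_eq_ediv_of_pos (by omega)]
        exact Int.ediv_nonneg ht0 (by omega)
      -- the build loop: served = pvServed times t0, heap = one event per machine
      have hsnd : (pvBuild t0 times).2 = pvServed times t0 := by
        rw [pvBuild, pvBuildP_snd, pvServed_eq_sum]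
        simp
      have hord : pvOrd (pvBuild t0 times).1 := by
        rw [pvBuild]; exact pvBuildP_ord t0 times (.nil, 0) trivial
      have hinv : pvInv times (pvElems (pvBuild t0 times).1) t0
          (M - 1 - ((M - pvServed times t0 - 1).toNat : Int)) := by
        rw [pvBuild, pvBuildP_elems]
        have hk : M - 1 - ((M - pvServed times t0 - 1).toNat : Int) = pvServed times t0 := by
          omega
        rw [hk]
        refine ⟨?_, ?_, ?_⟩
        · simp only [pvElems, Multiset.zero_add, Multiset.map_coe, List.map_map]
          have h : (Prod.snd ∘ fun x : Int => ((PySem.Int.floordiv t0 x + 1) * x, x)) = id := rfl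
          rw [h, List.map_id]
        · intro p hp
          simp only [pvElems, Multiset.zero_add, Multiset.mem_coe, List.mem_map] at hp
          obtain ⟨x, hx, rfl⟩ := hp
          have hx1 := hpos x hx
          rw [PySem.Int.floordiv_eq_ediv_of_pos (show (0:Int) < x by omega)]
          have ha0 : 0 ≤ t0 / x := Int.ediv_nonneg ht0 (by omega)
          have hax : t0 / x * x ≤ t0 := Int.ediv_mul_le t0 (by omega)
          have htx : t0 < (t0 / x + 1) * x := Int.lt_ediv_add_one_mul_self t0 (by omega)
          refine ⟨hx1, dvd_mul_left x (t0 / x + 1), ?_, ?_, by omega⟩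
          · have := mul_le_mul_of_nonneg_right (show (1:Int) ≤ t0 / x + 1 by omega)
              (show (0:Int) ≤ x by omega)
            omega
          · have hexp : (t0 / x + 1) * x - x = t0 / x * x := by ring
            omega
        · simp only [pvElems, Multiset.zero_add, Multiset.map_coe, List.map_map,
            Multiset.sum_coe]
          rw [pvServed_eq_sum]
          congr 1
          refine List.map_congr_left (fun x hx => ?_)
          have hx1 := hpos x hx
          simp only [Function.comp]
          rw [PySem.Int.floordiv_eq_ediv_of_pos (show (0:Int) < x by omega),
            Int.mul_ediv_cancel _ (show x ≠ 0 by omega)]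
          ring
      obtain ⟨hb1, hb2⟩ :=
        pvPop_inv M times hpos hne (M - pvServed times t0 - 1).toNat _ t0 hord hinv
      rw [hsnd]
      set v := pvPopLoop (M - pvServed times t0 - 1).toNat (pvBuild t0 times).1 with hv
      have hLv : L ≤ v := (pvP_iff M times L hpos hLP hLmin v).mp hb2
      have hvL : v ≤ L := by
        by_contra hc
        have : M ≤ pvServed times (v - 1) :=
          (pvP_iff M times L hpos hLP hLmin (v - 1)).mpr (by omega)
        omega
      omega
    rw [hA, hB]
  · -- M = 0: A's search range [1, 0] is empty → -1; B's guard → -1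
    have hz : M * m = 0 := by rw [hM0]; ring
    unfold solution solution_alt
    rw [hm]; simp only [Option.getD_some]
    rw [pvALoop, dif_neg (by omega), if_pos (by omega)]
  · -- M < 0 with a nonnegative time: M * max ≤ 0, so the range is empty → -1 on both sides
    have hm0 : 0 ≤ m := le_trans hx0 (hmax x hxmem)
    have hz : M * m ≤ 0 := mul_nonpos_of_nonpos_of_nonneg (by omega) hm0
    unfold solution solution_alt
    rw [hm]; simp only [Option.getD_some]
    rw [pvALoop, dif_neg (by omega), if_pos (by omega)]
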